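-- pv_equiv track=rewrite | github.com/26-1-BITAmin-NLP/NLP | src/housing_agent/pipeline/merge2.py | raw_units_dormitory
-- ===== SOURCE A (Python) =====
-- from collections import defaultdict
-- from typing import Any, Dict, Iterable, List, Tuple
--
-- def split_lines(text: str) -> List[str]:
--     return [ln.strip() for ln in (text or "").split("\n") if ln and ln.strip()]
--
-- def raw_units_dormitory(dorm_raw: List[Dict[str, Any]]) -> Dict[str, List[Tuple[str, str]]]:
--     grouped: Dict[Tuple[str, str], List[Dict[str, Any]]] = defaultdict(list)
--     for item in dorm_raw:
--         key = ((item.get("dorm_name") or "").strip(), (item.get("source_url") or "").strip())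
--         grouped[key].append(item)
--
--     out: Dict[str, List[Tuple[str, str]]] = {}
--     grouped_items = [grouped[k] for k in sorted(grouped.keys(), key=lambda x: (x[0], x[1]))]
--     for idx, items in enumerate(grouped_items, start=1):
--         pid = f"DORM_{idx:03d}"
--         units: List[Tuple[str, str]] = []
--         for row in items:
--             title = (row.get("guide_section") or "").strip() or "기숙사 안내"
--             for line in split_lines(row.get("guide_text") or ""):
--                 units.append((title, line))
--         out[pid] = units
--     return out
-- ===== SOURCE B (Python) =====
-- def raw_units_dormitory(dorm_raw):
--     def key_of(item):
--         return ((item.get("dorm_name") or "").strip(), (item.get("source_url") or "").strip())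
--
--     keys = sorted(dict.fromkeys(map(key_of, dorm_raw)))
--
--     def units_for(k):
--         units = []
--         for row in dorm_raw:
--             if key_of(row) != k:
--                 continue
--             title = (row.get("guide_section") or "").strip() or "기숙사 안내"
--             for ln in (row.get("guide_text") or "").split("\n"):
--                 if ln and ln.strip():
--                     units.append((title, ln.strip()))
--         return units
--
--     return {f"DORM_{idx:03d}": units_for(k) for idx, k in enumerate(keys, start=1)}
-- ===== Notes on version B (the rewrite author's own statement) =====
-- stated objective: alternative
-- what changed: Replaces A's one-pass defaultdict grouping followed by sorting the dict's keys with a dict-free decomposition: dedup the row keys, sort them, and build each group's units by filtering the original rows per key.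
import Mathlib
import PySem

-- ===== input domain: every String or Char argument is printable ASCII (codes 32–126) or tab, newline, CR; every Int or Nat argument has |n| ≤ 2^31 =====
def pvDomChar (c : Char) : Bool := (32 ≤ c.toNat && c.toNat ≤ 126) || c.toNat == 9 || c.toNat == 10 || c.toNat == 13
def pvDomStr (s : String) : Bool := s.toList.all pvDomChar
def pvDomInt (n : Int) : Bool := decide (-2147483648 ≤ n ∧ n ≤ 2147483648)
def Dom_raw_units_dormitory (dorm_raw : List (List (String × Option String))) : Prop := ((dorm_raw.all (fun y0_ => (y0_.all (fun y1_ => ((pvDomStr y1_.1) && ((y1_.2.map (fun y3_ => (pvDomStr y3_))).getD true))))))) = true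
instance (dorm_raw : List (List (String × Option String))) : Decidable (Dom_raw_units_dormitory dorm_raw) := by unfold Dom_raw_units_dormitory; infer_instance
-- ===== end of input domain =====

-- B replaces A's defaultdict grouping + key sort with a dict-free decomposition
-- (dedup keys, sort them, filter the rows per key); same result, similar cost ("alternative").


-- ===== PORT A =====
-- (row.get(k) or ""): a missing key or a None value becomes "" (exact: values are str or None)
def pyGetStr (row : List (String × Option String)) (k : String) : String :=
  match (PySem.Dict.mk row).get? k with
  | some (some s) => s
  | _ => ""

-- the grouping key ((item.get("dorm_name") or "").strip(), (item.get("source_url") or "").strip())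
def keyOf (item : List (String × Option String)) : String × String :=
  (PySem.Str.strip (pyGetStr item "dorm_name"), PySem.Str.strip (pyGetStr item "source_url"))

-- split_lines(text); '(text or "")' is the identity on strings, so it is dropped
def split_lines (text : String) : List String :=
  (((PySem.Str.split? text "\n").getD []).filter
    (fun ln => !(ln == "") && !(PySem.Str.strip ln == ""))).map PySem.Str.strip

-- (row.get("guide_section") or "").strip() or "기숙사 안내"
def titleOf (row : List (String × Option String)) : String :=
  let t := PySem.Str.strip (pyGetStr row "guide_section")
  if t == "" then "기숙사 안내" else t

-- f"DORM_{idx:03d}" (idx is always ≥ 1 here, where {:03d} coincides with zfill 3)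
def pid (idx : Int) : String := "DORM_" ++ PySem.Str.zfill (PySem.Int.toStr idx) 3

def raw_units_dormitory (dorm_raw : List (List (String × Option String))) : List (String × List (String × String)) :=
  let grouped : PySem.Dict (String × String) (List (List (String × Option String))) :=
    dorm_raw.foldl (fun d item => d.modify (keyOf item) [] (fun v => v ++ [item])) PySem.Dict.empty
  let sortedKeys := PySem.List.sorted2 grouped.keys (fun x => x.1) (fun x => x.2)
  let groupedItems := sortedKeys.map (fun k => grouped.getD k [])
  let out : PySem.Dict String (List (String × String)) :=
    (PySem.List.enumerate groupedItems 1).foldl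
      (fun out p =>
        out.insert (pid p.1)
          (p.2.foldl (fun units row =>
            units ++ (split_lines (pyGetStr row "guide_text")).map (fun line => (titleOf row, line))) []))
      PySem.Dict.empty
  out.items

-- ===== PORT B =====
def unitsFor (dorm_raw : List (List (String × Option String))) (k : String × String) : List (String × String) :=
  dorm_raw.foldl (fun units row =>
    if keyOf row == k then
      ((PySem.Str.split? (pyGetStr row "guide_text") "\n").getD []).foldl
        (fun u ln => if !(ln == "") && !(PySem.Str.strip ln == "") then u ++ [(titleOf row, PySem.Str.strip ln)] else u)
        units
    else units) []

def raw_units_dormitory_alt (dorm_raw : List (List (String × Option String))) : List (String × List (String × String)) :=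
  let keys := PySem.List.sorted2 (PySem.List.dedup (dorm_raw.map keyOf)) (fun x => x.1) (fun x => x.2)
  -- the dict comprehension, built by inserting the pairs in order
  ((PySem.List.enumerate keys 1).foldl
    (fun out p => out.insert (pid p.1) (unitsFor dorm_raw p.2))
    (PySem.Dict.empty : PySem.Dict String (List (String × String)))).items

-- ===== PRECONDITION & SPEC =====
def Spec_raw_units_dormitory (dorm_raw : List (List (String × Option String))) (out : List (String × List (String × String))) : Prop := out = raw_units_dormitory_alt dorm_raw
instance (dorm_raw : List (List (String × Option String))) (out : List (String × List (String × String))) : Decidable (Spec_raw_units_dormitory dorm_raw out) := by unfold Spec_raw_units_dormitory; infer_instance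

-- ===== CLAIM (what is proved, stated in full; the proofs are below) =====
def Claim_equal_raw_units_dormitory : Prop := ∀ (dorm_raw : List (List (String × Option String))), Dom_raw_units_dormitory dorm_raw → Spec_raw_units_dormitory dorm_raw (raw_units_dormitory dorm_raw)

-- ===== LEMMAS AND PROOFS =====

-- A's grouped dict has exactly the distinct keys, in first-appearance order
theorem keys_grouped (dorm_raw : List (List (String × Option String))) :
    (dorm_raw.foldl (fun d item => d.modify (keyOf item) [] (fun v => v ++ [item]))
      (PySem.Dict.empty : PySem.Dict (String × String) (List (List (String × Option String))))).keys
    = PySem.List.dedup (dorm_raw.map keyOf) := by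
  rw [PySem.Dict.keys_foldl_modify_key]
  simp [pysem, PySem.Dict.empty, PySem.Dict.keys]
  rw [PySem.Set.ofList_eq_foldl, List.foldl_map]

-- A's group for key k is the filter of the original rows
theorem getD_grouped (dorm_raw : List (List (String × Option String))) (k : String × String) :
    (dorm_raw.foldl (fun d item => d.modify (keyOf item) [] (fun v => v ++ [item]))
      (PySem.Dict.empty : PySem.Dict (String × String) (List (List (String × Option String))))).getD k []
    = dorm_raw.filter (fun r => keyOf r == k) := by
  have h := PySem.Dict.getD_foldl_modify_append (dorm_raw.map (fun r => (keyOf r, r)))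
    (PySem.Dict.empty : PySem.Dict (String × String) (List (List (String × Option String)))) k
  rw [List.foldl_map] at h
  simpa [PySem.Dict.empty, PySem.Dict.getD, PySem.Dict.get?, List.filter_map, Function.comp_def,
    List.map_map] using h

theorem foldl_append_list_if {α β : Type} (p : α → Bool) (g : α → List β) (l : List α) (acc : List β) :
    l.foldl (fun acc x => if p x then acc ++ g x else acc) acc = acc ++ (l.filter p).flatMap g := by
  induction l generalizing acc with
  | nil => simp
  | cons x xs ih => by_cases h : p x <;> simp [h, ih]

theorem enumerate_map {α β : Type} (f : α → β) (l : List α) (s : Int) :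
    PySem.List.enumerate (l.map f) s = (PySem.List.enumerate l s).map (fun p => (p.1, f p.2)) := by
  induction l generalizing s with
  | nil => simp [PySem.List.enumerate_nil]
  | cons x xs ih => simp [PySem.List.enumerate_cons, ih]

-- A's per-group unit loop over the filtered rows = B's guarded one-pass loop
theorem units_eq (dorm_raw : List (List (String × Option String))) (k : String × String) :
    (dorm_raw.filter (fun r => keyOf r == k)).foldl (fun units row =>
        units ++ (split_lines (pyGetStr row "guide_text")).map (fun line => (titleOf row, line))) []
    = unitsFor dorm_raw k := by
  have hinner : ∀ (units : List (String × String)) (row : List (String × Option String)),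
      ((PySem.Str.split? (pyGetStr row "guide_text") "\n").getD []).foldl
        (fun u ln => if !(ln == "") && !(PySem.Str.strip ln == "") then u ++ [(titleOf row, PySem.Str.strip ln)] else u) units
      = units ++ (split_lines (pyGetStr row "guide_text")).map (fun line => (titleOf row, line)) := by
    intro units row
    rw [PySem.List.foldl_append_if]
    simp [split_lines, List.map_map, Function.comp]
  unfold unitsFor
  have h2 : dorm_raw.foldl (fun units row =>
        if keyOf row == k then
          ((PySem.Str.split? (pyGetStr row "guide_text") "\n").getD []).foldl
            (fun u ln => if !(ln == "") && !(PySem.Str.strip ln == "") then u ++ [(titleOf row, PySem.Str.strip ln)] else u) units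
        else units) []
      = dorm_raw.foldl (fun units row =>
        if keyOf row == k then
          units ++ (split_lines (pyGetStr row "guide_text")).map (fun line => (titleOf row, line))
        else units) [] := by
    refine PySem.List.foldl_congr_mem _ _ _ _ ?_
    intro acc row _
    by_cases h : (keyOf row == k) = true
    · rw [if_pos h, if_pos h]; exact hinner acc row
    · rw [if_neg h, if_neg h]
  rw [h2, foldl_append_list_if, PySem.List.foldl_append_eq_flatMap]

-- ===== VERDICT (by name: the statement is the Claim_ definition above) =====
theorem raw_units_dormitory_spec : Claim_equal_raw_units_dormitory := by
  intro dorm_raw _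
  unfold Spec_raw_units_dormitory raw_units_dormitory raw_units_dormitory_alt
  simp only []
  rw [keys_grouped, enumerate_map, List.foldl_map]
  refine congrArg PySem.Dict.items ?_
  refine PySem.List.foldl_congr_mem _ _ _ _ ?_
  intro acc p _
  dsimp only
  rw [getD_grouped, units_eq]
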